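-- pv_equiv track=rewrite | github.com/algoprog/Faspect | models/extractive/unsupervised/unsupervised.py | get_word_ngrams
-- ===== SOURCE A (Python) =====
-- def get_word_ngrams(text, min_length=1, max_length=4, split_tokens=(',', '.')):
--     """
--     Returns word ngrams between min_length and max_length tokens.
--     :param text: the text to extract word ngrams from
--     :param min_length: the minimum number of tokens
--     :param max_length: the maximum number of tokens
--     :param split_tokens:
--     :return: list of word ngrams
--     """
--     tokens = []
--     for index, token in enumerate(text):
--         if token in split_tokens:
--             token = "#"
--         tokens.append((token, index))
--
--     max_length = min(max_length, len(tokens))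
--     all_ngrams = []
--     for n in range(min_length, max_length + 1):
--         ngrams = zip(*[tokens[i:] for i in range(n)])
--         for ngram in ngrams:
--             all_ngrams.append(ngram)
--
--     word_ngrams = [(" ".join([token[0] for token in ngram]), ngram[0][1], ngram[-1][1]) for ngram in all_ngrams]
--     word_ngrams = [ngram for ngram in word_ngrams if '#' not in ngram[0]]
--     return word_ngrams
-- ===== SOURCE B (Python) =====
-- def get_word_ngrams(text, min_length=1, max_length=4, split_tokens=(',', '.')):
--     # Partition tokens once into contiguous clean segments (dropping split tokens
--     # and tokens containing '#'), then emit every length-n window per segment.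
--     segments = []
--     current = []
--     for index, token in enumerate(text):
--         if token in split_tokens or '#' in token:
--             if current:
--                 segments.append(current)
--             current = []
--         else:
--             current.append((token, index))
--     if current:
--         segments.append(current)
--     max_length = min(max_length, len(text))
--     result = []
--     for n in range(max(min_length, 1), max_length + 1):
--         for seg in segments:
--             for start in range(len(seg) - n + 1):
--                 window = seg[start:start + n]
--                 result.append((" ".join(t for t, _ in window),
--                                window[0][1], window[-1][1]))
--     return result
-- ===== Notes on version B (the rewrite author's own statement) =====
-- stated objective: alternative
-- what changed: Instead of generating every n-gram over the full token list and filtering out those whose joined text contains '#', B partitions the tokens once into contiguous clean segments (dropping split tokens and tokens containing '#') and emits each length-n window segment by segment, so no discarded n-grams are ever built.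
import Mathlib
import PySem

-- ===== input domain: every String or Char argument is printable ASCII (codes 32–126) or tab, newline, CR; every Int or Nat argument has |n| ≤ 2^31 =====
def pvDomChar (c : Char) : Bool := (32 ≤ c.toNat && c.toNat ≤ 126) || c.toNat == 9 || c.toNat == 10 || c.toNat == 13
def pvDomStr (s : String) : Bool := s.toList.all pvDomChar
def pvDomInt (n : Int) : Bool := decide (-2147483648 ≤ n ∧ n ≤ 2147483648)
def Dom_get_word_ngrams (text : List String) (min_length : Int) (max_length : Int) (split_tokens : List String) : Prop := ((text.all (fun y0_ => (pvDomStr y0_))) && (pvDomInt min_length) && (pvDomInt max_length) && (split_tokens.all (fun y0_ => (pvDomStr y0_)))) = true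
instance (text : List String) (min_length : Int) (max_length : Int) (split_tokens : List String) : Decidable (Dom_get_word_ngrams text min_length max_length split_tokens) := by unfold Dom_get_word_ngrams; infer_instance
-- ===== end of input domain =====

-- B restructures A: one pass partitions the tokens into contiguous clean segments
-- (dropping split tokens and '#'-carrying tokens), then emits windows per segment,
-- so the build-everything-then-filter of A disappears. Same return value; alternative decomposition.

-- ===== PORT A =====
-- the builtin zip(*iterables): tuples of heads while every iterable is nonempty
-- (zip of zero iterables yields nothing)
def pvZipStarGo : List (String × Int) → List (List (String × Int)) → List (List (String × Int))
  | [], _ => []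
  | a :: tl, rest =>
    if rest.all (fun l => !l.isEmpty) then
      (a :: rest.map List.headI) :: pvZipStarGo tl (rest.map List.tail)
    else []

def pvZipStar : List (List (String × Int)) → List (List (String × Int))
  | [] => []
  | l :: rest => pvZipStarGo l rest

def get_word_ngrams (text : List String) (min_length : Int) (max_length : Int) (split_tokens : List String) : List (String × Int × Int) :=
  let tokens : List (String × Int) :=
    (PySem.List.enumerate text).foldl
      (fun acc p => acc ++ [((if p.2 ∈ split_tokens then "#" else p.2), p.1)]) []
  let max_length := min max_length (tokens.length : Int)
  let all_ngrams : List (List (String × Int)) :=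
    (PySem.List.pyRange min_length (max_length + 1) 1).foldl
      (fun acc n =>
        let ngrams := pvZipStar ((PySem.List.pyRange 0 n 1).map
          (fun i => PySem.List.slice tokens (some i) none))
        ngrams.foldl (fun acc2 g => acc2 ++ [g]) acc) []
  -- ngram[0] / ngram[-1]: every produced ngram is nonempty, so headI/getLastI are exact here
  let word_ngrams := all_ngrams.map (fun ngram =>
    (PySem.Str.join " " (ngram.map (fun t => t.1)), ngram.headI.2, ngram.getLastI.2))
  word_ngrams.filter (fun g => !(PySem.Str.isIn "#" g.1))

-- ===== PORT B =====
def get_word_ngrams_alt (text : List String) (min_length : Int) (max_length : Int) (split_tokens : List String) : List (String × Int × Int) :=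
  let st := (PySem.List.enumerate text).foldl
    (fun (sc : List (List (String × Int)) × List (String × Int)) q =>
      if decide (q.2 ∈ split_tokens) || PySem.Str.isIn "#" q.2 then
        (if sc.2 = [] then sc.1 else sc.1 ++ [sc.2], [])
      else (sc.1, sc.2 ++ [(q.2, q.1)]))
    ([], [])
  let segments := if st.2 = [] then st.1 else st.1 ++ [st.2]
  let max_length := min max_length (text.length : Int)
  (PySem.List.pyRange (max min_length 1) (max_length + 1) 1).foldl
    (fun acc n => segments.foldl
      (fun acc2 seg =>
        (PySem.List.pyRange 0 ((seg.length : Int) - n + 1) 1).foldl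
          (fun acc3 start =>
            let window := PySem.List.slice seg (some start) (some (start + n))
            acc3 ++ [(PySem.Str.join " " (window.map (fun t => t.1)), window.headI.2, window.getLastI.2)])
          acc2) acc) []

-- ===== PRECONDITION & SPEC =====
def Spec_get_word_ngrams (text : List String) (min_length : Int) (max_length : Int) (split_tokens : List String) (out : List (String × Int × Int)) : Prop := out = get_word_ngrams_alt text min_length max_length split_tokens
instance (text : List String) (min_length : Int) (max_length : Int) (split_tokens : List String) (out : List (String × Int × Int)) : Decidable (Spec_get_word_ngrams text min_length max_length split_tokens out) := by unfold Spec_get_word_ngrams; infer_instance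

-- ===== CLAIM (what is proved, stated in full; the proofs are below) =====
def Claim_equal_get_word_ngrams : Prop := ∀ (text : List String) (min_length : Int) (max_length : Int) (split_tokens : List String), Dom_get_word_ngrams text min_length max_length split_tokens → Spec_get_word_ngrams text min_length max_length split_tokens (get_word_ngrams text min_length max_length split_tokens)

-- ===== LEMMAS AND PROOFS =====

-- a token after A's replacement is dirty iff it contains '#'
def pvBad (t : String × Int) : Bool := PySem.Str.isIn "#" t.1

-- all length-n windows of a list, left to right
def pvWins {α : Type} (n : Nat) : List α → List (List α)
  | [] => []
  | x :: xs => if n ≤ xs.length + 1 then List.take n (x :: xs) :: pvWins n xs else []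

-- maximal runs of elements not satisfying p (p-elements dropped)
def pvSegs {α : Type} (p : α → Bool) : List α → List (List α)
  | [] => []
  | x :: xs =>
    if p x then pvSegs p xs
    else (x :: xs.takeWhile (fun y => !p y)) :: pvSegs p (xs.dropWhile (fun y => !p y))
termination_by l => l.length
decreasing_by
  · simp
  · have := List.length_dropWhile_le (fun y => !p y) xs; simp; omega

-- B's accumulator loop, as a recursion (cur = pending segment)
def pvAux {α : Type} (p : α → Bool) : List α → List α → List (List α)
  | c, [] => if c = [] then [] else [c]
  | c, x :: xs => if p x then (if c = [] then [] else [c]) ++ pvAux p [] xs else pvAux p (c ++ [x]) xs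

def pvFinish {α : Type} (r : List (List α) × List α) : List (List α) :=
  if r.2 = [] then r.1 else r.1 ++ [r.2]

theorem pvFold_aux {α : Type} (p : α → Bool) : ∀ (l : List α) (A : List (List α)) (c : List α),
    pvFinish
      (l.foldl (fun sc x => if p x then (if sc.2 = [] then sc.1 else sc.1 ++ [sc.2], ([] : List α)) else (sc.1, sc.2 ++ [x])) (A, c))
    = A ++ pvAux p c l := by
  intro l
  induction l with
  | nil =>
    intro A c
    simp only [List.foldl_nil, pvAux, pvFinish]
    split <;> simp
  | cons x xs ih =>
    intro A c
    simp only [List.foldl_cons, pvAux]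
    by_cases hx : p x = true
    · simp only [hx, if_true]
      rw [ih]
      split <;> simp [List.append_assoc]
    · simp only [hx, if_false, Bool.false_eq_true]
      rw [ih]

theorem pvAux_eq {α : Type} (p : α → Bool) : ∀ (l : List α) (c : List α),
    pvAux p c l = if c = [] then pvSegs p l
      else (c ++ l.takeWhile (fun y => !p y)) :: pvSegs p (l.dropWhile (fun y => !p y)) := by
  intro l
  induction l with
  | nil =>
    intro c
    simp only [pvAux, List.takeWhile_nil, List.dropWhile_nil]
    split <;> simp [pvSegs]
  | cons x xs ih =>
    intro c
    simp only [pvAux]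
    by_cases hx : p x = true
    · have hA := ih []
      simp only [if_pos rfl] at hA
      rw [if_pos hx, hA, pvSegs, if_pos hx]
      have hT : List.takeWhile (fun y => !p y) (x :: xs) = [] := by
        simp [List.takeWhile_cons, hx]
      have hD : List.dropWhile (fun y => !p y) (x :: xs) = x :: xs := by
        simp [List.dropWhile_cons, hx]
      rw [hT, hD]
      split <;> simp [pvSegs, hx]
    · have hx' : p x = false := by revert hx; cases p x <;> simp
      rw [if_neg (by simp [hx'])]
      have hB := ih (c ++ [x])
      rw [if_neg (by simp)] at hB
      rw [hB]
      have hT : List.takeWhile (fun y => !p y) (x :: xs)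
          = x :: List.takeWhile (fun y => !p y) xs := by simp [List.takeWhile_cons, hx']
      have hD : List.dropWhile (fun y => !p y) (x :: xs)
          = List.dropWhile (fun y => !p y) xs := by simp [List.dropWhile_cons, hx']
      split
      · next hc =>
        subst hc
        rw [pvSegs, if_neg (by simp [hx'])]
        simp
      · rw [hT, hD]
        simp

theorem pvAux_nil_eq {α : Type} (p : α → Bool) (l : List α) : pvAux p [] l = pvSegs p l := by
  rw [pvAux_eq, if_pos rfl]

theorem pvSegs_map_bounded {α : Type} (f : α → α) (p q : α → Bool)
    (hpq : ∀ t, p (f t) = q t) (hid : ∀ t, q t = false → f t = t) :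
    ∀ (N : Nat) (l : List α), l.length ≤ N → pvSegs p (l.map f) = pvSegs q l := by
  intro N
  induction N with
  | zero =>
    intro l hl
    have : l = [] := List.length_eq_zero_iff.mp (Nat.le_zero.mp hl)
    subst this; simp [pvSegs]
  | succ N ih =>
    intro l hl
    cases l with
    | nil => simp [pvSegs]
    | cons x xs =>
      simp only [List.map_cons]
      by_cases hx : q x = true
      · rw [pvSegs, if_pos (by rw [hpq]; exact hx), pvSegs, if_pos hx]
        exact ih xs (by simp at hl; omega)
      · have hx' : q x = false := by revert hx; cases q x <;> simp
        rw [pvSegs, if_neg (by rw [hpq, hx']; simp), pvSegs, if_neg (by rw [hx']; simp)]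
        have htw : ((fun y => !p y) ∘ f) = fun y => !q y := by
          funext y; simp [hpq]
        have hmapT : List.map f (List.takeWhile (fun y => !q y) xs)
            = List.map id (List.takeWhile (fun y => !q y) xs) := by
          apply List.map_congr_left
          intro a ha
          have := List.mem_takeWhile_imp ha
          simp only [Bool.not_eq_eq_eq_not, Bool.not_true] at this
          simp [hid a this]
        rw [List.takeWhile_map, htw, List.dropWhile_map, htw, hid x hx', hmapT, List.map_id]
        congr 1
        apply ih
        have h1 := List.length_dropWhile_le (fun y => !q y) xs
        simp at hl
        omega

theorem pvWins_nil_of_lt {α : Type} (n : Nat) : ∀ (l : List α), l.length < n → pvWins n l = [] := by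
  intro l
  cases l with
  | nil => intro _; rfl
  | cons x xs => intro h; rw [pvWins, if_neg]; simp at h; omega

theorem pvWins_closed {α : Type} (n : Nat) (hn : 1 ≤ n) :
    ∀ (l : List α), pvWins n l = (List.range (l.length + 1 - n)).map (fun j => (l.drop j).take n) := by
  intro l
  induction l with
  | nil => simp [pvWins]; omega
  | cons x xs ih =>
    rw [pvWins]
    by_cases h : n ≤ xs.length + 1
    · rw [if_pos h]
      have hlen : (x :: xs).length + 1 - n = (xs.length + 1 - n) + 1 := by simp only [List.length_cons]; omega
      rw [hlen, List.range_succ_eq_map, List.map_cons, List.map_map, ih]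
      simp [Function.comp, Nat.succ_eq_add_one, List.drop_succ_cons]
    · rw [if_neg h]
      have : (x :: xs).length + 1 - n = 0 := by simp only [List.length_cons]; omega
      rw [this]
      simp

theorem pvHeads {α : Type} [Inhabited α] (m : Nat) (xs : List α) (h : m ≤ xs.length) :
    (List.range m).map (fun i => (xs.drop i).headI) = xs.take m := by
  apply List.ext_getElem
  · simp; omega
  · intro i h1 h2
    simp only [List.getElem_map, List.getElem_range, List.getElem_take]
    have hi : i < m := by simpa using h1
    cases hd : xs.drop i with
    | nil =>
      exfalso
      rw [List.drop_eq_nil_iff] at hd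
      omega
    | cons a t =>
      have h0 : (xs.drop i)[0]'(by simp [hd]) = a := by simp [hd]
      rw [List.getElem_drop] at h0
      simpa using h0.symm

theorem pvAllNonempty {α : Type} (m : Nat) (xs : List α) :
    ((List.range m).map (fun i => xs.drop i)).all (fun l => !l.isEmpty) = decide (m ≤ xs.length) := by
  rw [Bool.eq_iff_iff]
  simp only [List.all_eq_true, List.mem_map, List.mem_range, decide_eq_true_eq]
  constructor
  · intro h
    by_contra hlt
    push_neg at hlt
    have := h (xs.drop xs.length) ⟨xs.length, by omega, rfl⟩
    simp [List.drop_eq_nil_iff] at this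
  · intro h l hl
    obtain ⟨i, hi, rfl⟩ := hl
    simp [List.isEmpty_iff, List.drop_eq_nil_iff]
    omega

theorem pvZipStarGo_eq (m : Nat) : ∀ (ts : List (String × Int)),
    pvZipStarGo ts ((List.range m).map (fun i => ts.drop (i + 1))) = pvWins (m + 1) ts := by
  intro ts
  induction ts with
  | nil => rfl
  | cons x xs ih =>
    have hmap : (List.range m).map (fun i => (x :: xs).drop (i + 1)) = (List.range m).map (fun i => xs.drop i) := by
      simp [List.drop_succ_cons]
    rw [hmap, pvZipStarGo, pvAllNonempty]
    by_cases hm : m ≤ xs.length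
    · rw [if_pos (by simp [hm])]
      have hheads : ((List.range m).map (fun i => xs.drop i)).map List.headI = xs.take m := by
        rw [List.map_map]
        exact pvHeads m xs hm
      have htails : ((List.range m).map (fun i => xs.drop i)).map List.tail = (List.range m).map (fun i => xs.drop (i + 1)) := by
        rw [List.map_map]
        apply List.map_congr_left
        intro j _
        simp [List.tail_drop]
      rw [hheads, htails, ih, pvWins, if_pos (by omega)]
      congr 1
    · rw [if_neg (by simp [hm]), pvWins, if_neg (by omega)]

theorem pvZipStar_eq_wins (tokens : List (String × Int)) (n : Int) (hn : 1 ≤ n) :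
    pvZipStar ((PySem.List.pyRange 0 n 1).map (fun i => PySem.List.slice tokens (some i) none))
      = pvWins n.toNat tokens := by
  obtain ⟨m, rfl⟩ : ∃ m : Nat, n = ((m + 1 : Nat) : Int) := ⟨(n - 1).toNat, by omega⟩
  rw [PySem.List.pyRange_zero_natCast, List.map_map]
  have hsl : ((fun i => PySem.List.slice tokens (some i) none) ∘ fun k : Nat => (k : Int))
      = fun k : Nat => tokens.drop k := by
    funext k
    simp [Function.comp, PySem.List.slice_from_natCast]
  rw [hsl, List.range_succ_eq_map, List.map_cons, List.map_map]
  simp only [List.drop_zero]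
  rw [pvZipStar]
  have hrest : ((fun k : Nat => tokens.drop k) ∘ Nat.succ) = fun i : Nat => tokens.drop (i + 1) := by
    funext i; simp [Nat.succ_eq_add_one]
  rw [show (((m + 1 : Nat) : Int)).toNat = m + 1 from by omega, hrest, pvZipStarGo_eq]

theorem pvMemIntercalate : ∀ (ls : List (List Char)),
    ('#' ∈ List.intercalate [' '] ls) ↔ ∃ cs ∈ ls, '#' ∈ cs := by
  intro ls
  match ls with
  | [] => simp [List.intercalate]
  | [cs] => simp [List.intercalate]
  | cs :: cs' :: t =>
    have ih := pvMemIntercalate (cs' :: t)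
    have hne : ¬ (('#' : Char) = ' ') := by decide
    simp only [List.intercalate] at ih ⊢
    rw [show List.intersperse [' '] (cs :: cs' :: t) = cs :: [' '] :: List.intersperse [' '] (cs' :: t) from rfl]
    simp only [List.flatten_cons, List.mem_append, List.mem_singleton] at ih ⊢
    rw [ih]
    simp [hne]

theorem pvJoin_hash (parts : List String) :
    PySem.Str.isIn "#" (PySem.Str.join " " parts) = parts.any (fun s => PySem.Str.isIn "#" s) := by
  rw [Bool.eq_iff_iff, PySem.Str.isIn_iff_infix, PySem.Str.toList_join]
  have h1 : ("#" : String).toList = ['#'] := rfl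
  have h2 : (" " : String).toList = [' '] := rfl
  rw [h1, h2, List.singleton_infix_iff]
  unfold PySem.Chars.join
  rw [pvMemIntercalate]
  simp only [List.any_eq_true, List.mem_map]
  constructor
  · rintro ⟨cs, ⟨s, hs, rfl⟩, hc⟩
    refine ⟨s, hs, ?_⟩
    rw [PySem.Str.isIn_iff_infix, h1, List.singleton_infix_iff]
    exact hc
  · rintro ⟨s, hs, hc⟩
    rw [PySem.Str.isIn_iff_infix, h1, List.singleton_infix_iff] at hc
    exact ⟨s.toList, ⟨s, hs, rfl⟩, hc⟩

theorem pvFilterPred (w : List (String × Int)) :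
    (!(PySem.Str.isIn "#" (PySem.Str.join " " (w.map (fun t => t.1))))) = !(w.any pvBad) := by
  rw [pvJoin_hash, List.any_map]
  rfl

theorem pvFilterFlatMap {α β : Type} (l : List α) (g : α → List β) (p : β → Bool) :
    (l.flatMap g).filter p = l.flatMap (fun x => (g x).filter p) := by
  induction l with
  | nil => rfl
  | cons x xs ih => simp [List.flatMap_cons, List.filter_append, ih]

theorem pvDropWhile_head {α : Type} (p : α → Bool) : ∀ (l : List α) (z : α) (zs : List α),
    l.dropWhile p = z :: zs → p z = false := by
  intro l
  induction l with
  | nil => intro z zs h; simp [List.dropWhile_nil] at h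
  | cons a t ih =>
    intro z zs h
    rw [List.dropWhile_cons] at h
    by_cases hp : p a = true
    · rw [if_pos hp] at h
      exact ih z zs h
    · rw [if_neg hp] at h
      cases h
      simpa using hp

theorem pvWins_filter_append (n : Nat) (hn : 1 ≤ n) :
    ∀ (s r : List (String × Int)), (∀ y ∈ s, pvBad y = false) →
    (∀ z zs, r = z :: zs → pvBad z = true) →
    (pvWins n (s ++ r)).filter (fun w => !w.any pvBad)
      = pvWins n s ++ (pvWins n r).filter (fun w => !w.any pvBad) := by
  intro s
  induction s with
  | nil =>
    intro r _ _
    simp [pvWins]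
  | cons y s' ih =>
    intro r hs hr
    have hs' : ∀ z ∈ s', pvBad z = false := fun z hz => hs z (List.mem_cons_of_mem _ hz)
    rw [List.cons_append, pvWins]
    by_cases h : n ≤ (s' ++ r).length + 1
    · rw [if_pos h]
      by_cases h2 : n ≤ s'.length + 1
      · have hw : List.take n (y :: (s' ++ r)) = List.take n (y :: s') := by
          rw [show y :: (s' ++ r) = (y :: s') ++ r from rfl,
            List.take_append_of_le_length (by simp; omega)]
        have hgood : ((List.take n (y :: (s' ++ r))).any pvBad) = false := by
          rw [hw]
          rw [List.any_eq_false]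
          intro z hz
          simp [hs z (List.mem_of_mem_take hz)]
        rw [List.filter_cons]
        simp only [hgood, Bool.not_false, if_true]
        rw [ih r hs' hr, hw]
        conv_rhs => rw [pvWins, if_pos h2]
        simp
      · have hrne : ∃ z zs, r = z :: zs := by
          cases r with
          | nil => exfalso; simp at h; omega
          | cons z zs => exact ⟨z, zs, rfl⟩
        obtain ⟨z, zs, rfl⟩ := hrne
        have hbadz : pvBad z = true := hr z zs rfl
        have hmem : z ∈ List.take n (y :: (s' ++ z :: zs)) := by
          rw [show y :: (s' ++ z :: zs) = (y :: s') ++ z :: zs from rfl, List.take_append]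
          apply List.mem_append_right
          obtain ⟨k, hk⟩ : ∃ k, n - (y :: s').length = k + 1 := ⟨n - (y :: s').length - 1, by simp; omega⟩
          rw [hk, List.take_succ_cons]
          exact List.mem_cons_self
        have hany : ((List.take n (y :: (s' ++ z :: zs))).any pvBad) = true :=
          List.any_eq_true.mpr ⟨z, hmem, hbadz⟩
        rw [List.filter_cons]
        simp only [hany, Bool.not_true, Bool.false_eq_true, if_false]
        rw [ih _ hs' hr, pvWins_nil_of_lt n s' (by omega)]
        conv_rhs => rw [pvWins, if_neg h2]
    · rw [if_neg h]
      have e1 : pvWins n (y :: s') = [] := pvWins_nil_of_lt n _ (by simp at h ⊢; omega)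
      have e2 : pvWins n r = [] := pvWins_nil_of_lt n _ (by simp at h ⊢; omega)
      simp [e1, e2]

theorem pvFilter_eq_segs (n : Nat) (hn : 1 ≤ n) :
    ∀ (N : Nat) (ts : List (String × Int)), ts.length ≤ N →
    (pvWins n ts).filter (fun w => !w.any pvBad) = (pvSegs pvBad ts).flatMap (pvWins n) := by
  intro N
  induction N with
  | zero =>
    intro ts h
    have : ts = [] := List.length_eq_zero_iff.mp (Nat.le_zero.mp h)
    subst this
    simp [pvWins, pvSegs]
  | succ N ih =>
    intro ts hlen
    cases ts with
    | nil => simp [pvWins, pvSegs]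
    | cons x xs =>
      cases hx : pvBad x with
      | true =>
        rw [pvSegs, if_pos hx, pvWins]
        by_cases h : n ≤ xs.length + 1
        · rw [if_pos h, List.filter_cons]
          have hmem : x ∈ List.take n (x :: xs) := by
            obtain ⟨k, hk⟩ : ∃ k, n = k + 1 := ⟨n - 1, by omega⟩
            rw [hk, List.take_succ_cons]
            exact List.mem_cons_self
          have hany : (List.take n (x :: xs)).any pvBad = true := List.any_eq_true.mpr ⟨x, hmem, hx⟩
          simp only [hany, Bool.not_true, Bool.false_eq_true, if_false]
          exact ih xs (by simp at hlen; omega)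
        · rw [if_neg h]
          have hwnil : pvWins n xs = [] := pvWins_nil_of_lt n xs (by simp at h; omega)
          rw [← ih xs (by simp at hlen; omega), hwnil]
      | false =>
        rw [pvSegs, if_neg (by simp [hx])]
        have hgoods : ∀ z ∈ x :: List.takeWhile (fun y => !pvBad y) xs, pvBad z = false := by
          intro z hz
          rcases List.mem_cons.mp hz with rfl | hz'
          · exact hx
          · have h2 := List.mem_takeWhile_imp hz'
            simpa using h2
        have hbadhead : ∀ z zs, List.dropWhile (fun y => !pvBad y) xs = z :: zs → pvBad z = true := by
          intro z zs hd
          have h2 := pvDropWhile_head (fun y => !pvBad y) xs z zs hd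
          simpa using h2
        have hsplit : x :: xs = (x :: List.takeWhile (fun y => !pvBad y) xs) ++ List.dropWhile (fun y => !pvBad y) xs := by
          simp [List.takeWhile_append_dropWhile]
        conv_lhs => rw [hsplit]
        rw [pvWins_filter_append n hn _ _ hgoods hbadhead]
        rw [ih (List.dropWhile (fun y => !pvBad y) xs)
          (by have := List.length_dropWhile_le (fun y => !pvBad y) xs; simp at hlen; omega)]
        simp [List.flatMap_cons]

theorem pvInner_eq {β : Type} (seg : List (String × Int)) (n : Int) (hn : 1 ≤ n)
    (f : List (String × Int) → β) :
    (PySem.List.pyRange 0 ((seg.length : Int) - n + 1) 1).map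
        (fun s => f (PySem.List.slice seg (some s) (some (s + n))))
      = (pvWins n.toNat seg).map f := by
  by_cases h : n.toNat ≤ seg.length + 1
  · have hk : ((seg.length : Int) - n + 1) = ((seg.length + 1 - n.toNat : Nat) : Int) := by omega
    rw [hk, PySem.List.pyRange_zero_natCast, List.map_map,
      pvWins_closed n.toNat (by omega) seg, List.map_map]
    apply List.map_congr_left
    intro j _
    simp only [Function.comp]
    rw [show (j : Int) + n = ((j : Int) + ((n.toNat : Nat) : Int)) from by omega,
      PySem.List.slice_natCast_add]
  · rw [PySem.List.pyRange_one_eq_nil (by omega : (seg.length : Int) - n + 1 ≤ 0),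
      pvWins_nil_of_lt n.toNat seg (by omega)]
    simp

theorem pvRange_shift {γ : Type} (a b : Int) (fa fb : Int → List γ)
    (h0 : ∀ n : Int, n ≤ 0 → fa n = []) (h1 : ∀ n : Int, 1 ≤ n → fa n = fb n) :
    (PySem.List.pyRange a b 1).flatMap fa = (PySem.List.pyRange (max a 1) b 1).flatMap fb := by
  by_cases ha : 1 ≤ a
  · rw [max_eq_left ha]
    have hcong : ∀ x ∈ PySem.List.pyRange a b 1, fa x = fb x := fun x hx =>
      h1 x (by have := (PySem.List.mem_pyRange_one.mp hx).1; omega)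
    rw [List.flatMap_def, List.flatMap_def, List.map_congr_left hcong]
  · by_cases hb : 1 ≤ b
    · rw [PySem.List.pyRange_one_append a 1 b (by omega) hb, List.flatMap_append]
      have hnil : (PySem.List.pyRange a 1 1).flatMap fa = [] :=
        List.flatMap_eq_nil_iff.mpr (fun x hx => h0 x (by have := (PySem.List.mem_pyRange_one.mp hx).2; omega))
      rw [hnil, List.nil_append, max_eq_right (by omega)]
      have hcong : ∀ x ∈ PySem.List.pyRange 1 b 1, fa x = fb x := fun x hx =>
        h1 x ((PySem.List.mem_pyRange_one.mp hx).1)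
      rw [List.flatMap_def, List.flatMap_def, List.map_congr_left hcong]
    · rw [max_eq_right (by omega), PySem.List.pyRange_one_eq_nil (by omega : b ≤ 1)]
      simp only [List.flatMap_nil]
      exact List.flatMap_eq_nil_iff.mpr (fun x hx => h0 x (by have := (PySem.List.mem_pyRange_one.mp hx).2; omega))

-- abbreviations used to assemble the two sides
def pvF : List (String × Int) → String × Int × Int :=
  fun w => (PySem.Str.join " " (w.map (fun t => t.1)), w.headI.2, w.getLastI.2)

def pvPB2 (split_tokens : List String) : String × Int → Bool :=
  fun t => decide (t.1 ∈ split_tokens) || PySem.Str.isIn "#" t.1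

def pvRepl (split_tokens : List String) : String × Int → String × Int :=
  fun t => ((if t.1 ∈ split_tokens then "#" else t.1), t.2)

def pvLsw (text : List String) : List (String × Int) :=
  (PySem.List.enumerate text).map (fun q => (q.2, q.1))

def pvFb (split_tokens : List String) (text : List String) : Int → List (String × Int × Int) :=
  fun n => (pvSegs (pvPB2 split_tokens) (pvLsw text)).flatMap (fun seg => (pvWins n.toNat seg).map pvF)

-- ===== VERDICT (by name: the statement is the Claim_ definition above) =====
theorem get_word_ngrams_spec : Claim_equal_get_word_ngrams := by
  intro text min_length max_length split_tokens _
  show get_word_ngrams text min_length max_length split_tokens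
      = get_word_ngrams_alt text min_length max_length split_tokens
  have hpq : ∀ t, pvBad (pvRepl split_tokens t) = pvPB2 split_tokens t := by
    intro t
    by_cases h : t.1 ∈ split_tokens
    · simp [pvBad, pvRepl, pvPB2, h]
      decide
    · simp [pvBad, pvRepl, pvPB2, h]
  have hid : ∀ t, pvPB2 split_tokens t = false → pvRepl split_tokens t = t := by
    intro t ht
    simp only [pvPB2, Bool.or_eq_false_iff, decide_eq_false_iff_not] at ht
    simp [pvRepl, ht.1]
  have hseg :
      (if ((PySem.List.enumerate text).foldl
            (fun (sc : List (List (String × Int)) × List (String × Int)) q =>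
              if decide (q.2 ∈ split_tokens) || PySem.Str.isIn "#" q.2 then
                (if sc.2 = [] then sc.1 else sc.1 ++ [sc.2], [])
              else (sc.1, sc.2 ++ [(q.2, q.1)]))
            ([], [])).2 = []
       then ((PySem.List.enumerate text).foldl
            (fun (sc : List (List (String × Int)) × List (String × Int)) q =>
              if decide (q.2 ∈ split_tokens) || PySem.Str.isIn "#" q.2 then
                (if sc.2 = [] then sc.1 else sc.1 ++ [sc.2], [])
              else (sc.1, sc.2 ++ [(q.2, q.1)]))
            ([], [])).1
       else ((PySem.List.enumerate text).foldl
            (fun (sc : List (List (String × Int)) × List (String × Int)) q =>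
              if decide (q.2 ∈ split_tokens) || PySem.Str.isIn "#" q.2 then
                (if sc.2 = [] then sc.1 else sc.1 ++ [sc.2], [])
              else (sc.1, sc.2 ++ [(q.2, q.1)]))
            ([], [])).1 ++ [((PySem.List.enumerate text).foldl
            (fun (sc : List (List (String × Int)) × List (String × Int)) q =>
              if decide (q.2 ∈ split_tokens) || PySem.Str.isIn "#" q.2 then
                (if sc.2 = [] then sc.1 else sc.1 ++ [sc.2], [])
              else (sc.1, sc.2 ++ [(q.2, q.1)]))
            ([], [])).2])
      = pvSegs (pvPB2 split_tokens) (pvLsw text) := by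
    have h1 : (PySem.List.enumerate text).foldl
          (fun (sc : List (List (String × Int)) × List (String × Int)) q =>
            if decide (q.2 ∈ split_tokens) || PySem.Str.isIn "#" q.2 then
              (if sc.2 = [] then sc.1 else sc.1 ++ [sc.2], [])
            else (sc.1, sc.2 ++ [(q.2, q.1)]))
          ([], [])
        = (pvLsw text).foldl
            (fun sc x => if pvPB2 split_tokens x then
                (if sc.2 = [] then sc.1 else sc.1 ++ [sc.2], ([] : List (String × Int)))
              else (sc.1, sc.2 ++ [x])) ([], []) := by
      rw [pvLsw, List.foldl_map]
      rfl
    rw [h1]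
    have h2 := pvFold_aux (pvPB2 split_tokens) (pvLsw text) [] []
    rw [pvAux_nil_eq, List.nil_append] at h2
    exact h2
  have hTT : List.map (fun p : Int × String => ((if p.2 ∈ split_tokens then "#" else p.2), p.1))
        (PySem.List.enumerate text)
      = (pvLsw text).map (pvRepl split_tokens) := by
    rw [pvLsw, List.map_map]
    rfl
  simp only [get_word_ngrams, get_word_ngrams_alt,
    PySem.List.foldl_append_singleton_eq_map, PySem.List.foldl_append_singleton_eq_self,
    PySem.List.foldl_append_eq_flatMap, List.nil_append, List.map_id', List.map_id,
    List.length_map, PySem.List.length_enumerate]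
  rw [hseg, hTT, List.map_flatMap, pvFilterFlatMap]
  refine Eq.trans (pvRange_shift min_length (min max_length (text.length : Int) + 1) _
      (pvFb split_tokens text) ?_ ?_) ?_
  · -- n ≤ 0 contributes nothing on A's side
    intro n hn
    rw [PySem.List.pyRange_one_eq_nil hn]
    rfl
  · -- 1 ≤ n: A's filtered windows are B's per-segment windows
    intro n hn
    rw [List.filter_map, pvZipStar_eq_wins _ n hn]
    have hpred : ((fun g : String × Int × Int => !PySem.Str.isIn "#" g.1) ∘
          (fun ngram : List (String × Int) =>
            (PySem.Str.join " " (List.map (fun t => t.1) ngram), ngram.headI.2, ngram.getLastI.2)))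
        = fun w => !List.any w pvBad := by
      funext w
      exact pvFilterPred w
    rw [hpred,
      pvFilter_eq_segs n.toNat (by omega) (((pvLsw text).map (pvRepl split_tokens)).length) _ le_rfl,
      pvSegs_map_bounded (pvRepl split_tokens) pvBad (pvPB2 split_tokens) hpq hid
        (pvLsw text).length (pvLsw text) le_rfl,
      List.map_flatMap]
    rfl
  · -- B's side: per segment, the index loop enumerates exactly the windows
    rw [List.flatMap_def, List.flatMap_def]
    apply congrArg
    apply List.map_congr_left
    intro n hn
    have hn1 : 1 ≤ n := by
      have := (PySem.List.mem_pyRange_one.mp hn).1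
      omega
    rw [pvFb, List.flatMap_def, List.flatMap_def]
    apply congrArg
    apply List.map_congr_left
    intro seg _
    exact (pvInner_eq seg n hn1 pvF).symm
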